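-- pv_equiv track=rewrite | github.com/pypi-data/pypi-mirror-402 | packages/kuasarr/kuasarr-1.12.2-py3-none-any.whl/kuasarr/downloads/sources/dl.py | normalize_mirror_name
-- ===== SOURCE A (Python) =====
-- COMMON_TLDS = {'.com', '.net', '.io', '.cc', '.to', '.me', '.org', '.co', '.de', '.eu', '.info'}
--
-- def normalize_mirror_name(name):
--     """
--     Normalize mirror name for comparison by lowercasing and removing TLDs.
--     e.g., "DDownload.com" -> "ddownload", "Rapidgator.net" -> "rapidgator"
--     """
--     if not name:
--         return ""
--     normalized = name.lower().strip()
--     for tld in COMMON_TLDS: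
--         if normalized.endswith(tld):
--             normalized = normalized[:-len(tld)]
--             break
--     return normalized
-- ===== SOURCE B (Python) =====
-- COMMON_TLDS = {'.com', '.net', '.io', '.cc', '.to', '.me', '.org', '.co', '.de', '.eu', '.info'}
--
-- def normalize_mirror_name(name):
--     """Normalize mirror name: lowercase, strip, drop a known TLD suffix."""
--     if not name:
--         return ""
--     normalized = name.lower().strip()
--     idx = normalized.rfind('.')
--     if idx != -1 and normalized[idx:] in COMMON_TLDS:
--         return normalized[:idx]
--     return normalized
-- ===== Notes on version B (the rewrite author's own statement) =====
-- stated objective: simpler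
-- what changed: Replaces the linear endswith-scan over the 11 COMMON_TLDS with a single rfind of the last dot plus one set-membership test of that suffix (sound because no TLD contains an inner dot and none is a suffix of another).
import Mathlib
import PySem

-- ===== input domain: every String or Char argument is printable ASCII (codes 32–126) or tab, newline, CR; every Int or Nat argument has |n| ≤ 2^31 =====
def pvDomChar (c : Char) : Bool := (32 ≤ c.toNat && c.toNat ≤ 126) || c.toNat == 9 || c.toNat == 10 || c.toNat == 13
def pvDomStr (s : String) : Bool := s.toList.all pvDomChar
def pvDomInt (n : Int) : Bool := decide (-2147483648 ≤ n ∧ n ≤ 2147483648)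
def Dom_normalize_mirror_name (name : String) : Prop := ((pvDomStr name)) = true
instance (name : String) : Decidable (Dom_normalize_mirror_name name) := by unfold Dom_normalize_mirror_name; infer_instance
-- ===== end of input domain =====

-- B replaces A's linear endswith-scan over COMMON_TLDS by one rfind('.') plus a single
-- membership test of the last-dot suffix; objective: simpler.

-- ===== PORT A =====
-- module constant (a Python set literal of 11 distinct strings, kept as its distinct elements)
def COMMON_TLDS : List String := [".com", ".net", ".io", ".cc", ".to", ".me", ".org", ".co", ".de", ".eu", ".info"]

-- 'for tld in COMMON_TLDS: if normalized.endswith(tld): normalized = normalized[:-len(tld)]; break'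
-- (iteration order is the literal order; at most one TLD can match — none is a suffix of
-- another, see pv_tld_nosuffix below — so any set iteration order gives this result)
def pvTldLoop : String → List String → String
  | normalized, [] => normalized
  | normalized, tld :: rest =>
      if PySem.Str.endswith normalized tld then
        PySem.Str.slice normalized none (some (-(PySem.Str.len tld)))
      else pvTldLoop normalized rest

def normalize_mirror_name (name : String) : String :=
  if name.toList = [] then ""
  else pvTldLoop (PySem.Str.strip (PySem.Str.lower name)) COMMON_TLDS

-- ===== PORT B =====
def normalize_mirror_name_alt (name : String) : String :=
  if name.toList = [] then ""
  else
    let normalized := PySem.Str.strip (PySem.Str.lower name)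
    let idx := PySem.Str.rfind normalized "."
    if idx ≠ -1 ∧ PySem.Str.slice normalized (some idx) none ∈ COMMON_TLDS then
      PySem.Str.slice normalized none (some idx)
    else normalized

-- ===== PRECONDITION & SPEC =====
def Spec_normalize_mirror_name (name : String) (out : String) : Prop := out = normalize_mirror_name_alt name
instance (name : String) (out : String) : Decidable (Spec_normalize_mirror_name name out) := by unfold Spec_normalize_mirror_name; infer_instance

-- ===== CLAIM (what is proved, stated in full; the proofs are below) =====
def Claim_equal_normalize_mirror_name : Prop := ∀ (name : String), Dom_normalize_mirror_name name → Spec_normalize_mirror_name name (normalize_mirror_name name)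

-- ===== LEMMAS AND PROOFS =====

theorem pv_go_mem (s sub : List Char) (n i : Nat) (hi : i ≤ n)
    (hp : sub <+: s.drop i)
    (hmax : ∀ j, i < j → j ≤ n → ¬ sub <+: s.drop j) :
    PySem.Chars.rfind.go s sub n = (i : Int) := by
  induction n with
  | zero =>
    interval_cases i
    simp [PySem.Chars.rfind.go]
    simpa using hp
  | succ n ih =>
    by_cases hc : sub <+: s.drop (n+1)
    · have : i = n + 1 := by
        by_contra hne
        exact hmax (n+1) (by omega) (by omega) hc
      subst this
      simp [PySem.Chars.rfind.go, hc]
    · have hi' : i ≤ n := by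
        rcases Nat.lt_or_ge i (n+1) with h | h
        · omega
        · have : i = n+1 := by omega
          subst this; exact absurd hp hc
      simp [PySem.Chars.rfind.go, hc]
      exact ih hi' (fun j h1 h2 => hmax j h1 (by omega))

theorem pv_prefix_dot (l : List Char) : ['.'] <+: l ↔ l.head? = some '.' := by
  cases l with
  | nil => simp
  | cons c cs => simp [List.cons_prefix_cons, eq_comm]

-- the TLDs as char lists, for list-level reasoning
def pvTldsC : List (List Char) := COMMON_TLDS.map String.toList

theorem pv_tld_shape : ∀ t ∈ pvTldsC, t.head? = some '.' ∧ '.' ∉ t.tail := by decide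

theorem pv_tld_nosuffix : ∀ t ∈ pvTldsC, ∀ u ∈ pvTldsC, t <:+ u → t = u := by decide


theorem pv_loop_nomatch (s : String) (ts : List String)
    (h : ∀ t ∈ ts, ¬ (t.toList <:+ s.toList)) : pvTldLoop s ts = s := by
  induction ts with
  | nil => rfl
  | cons t rest ih =>
    have hf : PySem.Str.endswith s t = false := by
      rw [PySem.Str.endswith_eq]
      exact (Bool.not_eq_true _).mp (fun hc => h t (by simp) ((PySem.Chars.endswith_iff _ _).mp hc))
    simp only [pvTldLoop]
    rw [hf]
    simp only [Bool.false_eq_true, if_false]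
    exact ih (fun u hu => h u (List.mem_cons_of_mem _ hu))

theorem pv_loop_match (s : String) (ts : List String) (t : String)
    (ht : t ∈ ts) (hsuf : t.toList <:+ s.toList)
    (huniq : ∀ u ∈ ts, u.toList <:+ s.toList → u = t) :
    pvTldLoop s ts = PySem.Str.slice s none (some (-(PySem.Str.len t))) := by
  induction ts with
  | nil => simp at ht
  | cons u rest ih =>
    by_cases hc : u.toList <:+ s.toList
    · have hu : u = t := huniq u (List.mem_cons_self ..) hc
      subst hu
      have htr : PySem.Str.endswith s u = true := by
        rw [PySem.Str.endswith_eq]; exact (PySem.Chars.endswith_iff _ _).mpr hc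
      simp only [pvTldLoop]
      rw [htr]
      simp
    · have hne : u ≠ t := fun he => hc (he ▸ hsuf)
      have ht' : t ∈ rest := by
        rcases List.mem_cons.mp ht with h | h
        · exact absurd h.symm hne
        · exact h
      have hf : PySem.Str.endswith s u = false := by
        rw [PySem.Str.endswith_eq]
        exact (Bool.not_eq_true _).mp (fun hb => hc ((PySem.Chars.endswith_iff _ _).mp hb))
      simp only [pvTldLoop]
      rw [hf]
      simp only [Bool.false_eq_true, if_false]
      exact ih ht' (fun v hv => huniq v (List.mem_cons_of_mem _ hv))

theorem pv_rfind_eq (L u w : List Char) (hL : L = u ++ '.' :: w) (hw : '.' ∉ w) :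
    PySem.Chars.rfind L ['.'] = (u.length : Int) := by
  subst hL
  unfold PySem.Chars.rfind
  apply pv_go_mem
  · simp
  · rw [List.drop_left, pv_prefix_dot]; rfl
  · intro j h1 h2
    rw [pv_prefix_dot, List.head?_drop]
    intro hget
    have hj : u.length ≤ j := by omega
    rw [List.getElem?_append_right hj] at hget
    rcases Nat.exists_eq_add_of_lt (by omega : u.length < j) with ⟨k, hk⟩
    have : ('.' :: w)[j - u.length]? = w[k]? := by
      have : j - u.length = k + 1 := by omega
      rw [this]; rfl
    rw [this] at hget
    exact hw (List.mem_of_getElem? hget)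

theorem pv_core (s : String) :
    pvTldLoop s COMMON_TLDS =
      (if PySem.Str.rfind s "." ≠ -1 ∧ PySem.Str.slice s (some (PySem.Str.rfind s ".")) none ∈ COMMON_TLDS
       then PySem.Str.slice s none (some (PySem.Str.rfind s "."))
       else s) := by
  by_cases hex : ∃ t ∈ COMMON_TLDS, t.toList <:+ s.toList
  · obtain ⟨t, htmem, hsuf⟩ := hex
    have htC : t.toList ∈ pvTldsC := List.mem_map.mpr ⟨t, htmem, rfl⟩
    have huniq : ∀ u ∈ COMMON_TLDS, u.toList <:+ s.toList → u = t := by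
      intro u humem hus
      have huC : u.toList ∈ pvTldsC := List.mem_map.mpr ⟨u, humem, rfl⟩
      have : u.toList = t.toList := by
        rcases List.suffix_or_suffix_of_suffix hus hsuf with h | h
        · exact pv_tld_nosuffix _ huC _ htC h
        · exact (pv_tld_nosuffix _ htC _ huC h).symm
      calc u = String.ofList u.toList := by simp
        _ = String.ofList t.toList := by rw [this]
        _ = t := by simp
    rw [pv_loop_match s _ t htmem hsuf huniq]
    -- decompose t
    obtain ⟨hhd, hnd⟩ := pv_tld_shape _ htC
    obtain ⟨u, hu⟩ := hsuf
    have htl : t.toList = '.' :: t.toList.tail := by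
      cases h : t.toList with
      | nil => rw [h] at hhd; simp at hhd
      | cons c cs => rw [h] at hhd; simp at hhd; simp [hhd]
    have hr : PySem.Str.rfind s "." = (u.length : Int) := by
      rw [PySem.Str.rfind_eq]
      exact pv_rfind_eq s.toList u t.toList.tail (by rw [← htl, hu]) hnd
    rw [hr]
    have hlen : s.toList.length = u.length + t.toList.length := by
      rw [← hu]; simp
    have htpos : 0 < t.toList.length := by rw [htl]; simp
    have hslice_mem : PySem.Str.slice s (some (u.length : Int)) none = t := by
      have : PySem.Chars.slice s.toList (some (u.length : Int)) none = t.toList := by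
        simp only [PySem.Chars.slice]
        rw [PySem.List.slice_some_none, PySem.List.clampIdx_natCast]
        have : min u.length s.toList.length = u.length := by omega
        rw [this, ← hu, List.drop_left]
      calc PySem.Str.slice s (some (u.length : Int)) none
          = String.ofList (PySem.Chars.slice s.toList (some (u.length : Int)) none) := rfl
        _ = String.ofList t.toList := by rw [this]
        _ = t := by simp
    rw [if_pos ⟨by omega, by rw [hslice_mem]; exact htmem⟩]
    -- outputs equal
    show PySem.Str.slice s none (some (-(PySem.Str.len t))) = PySem.Str.slice s none (some (u.length : Int))
    have h1 : PySem.Chars.slice s.toList none (some (-(t.toList.length : Int))) = PySem.Chars.slice s.toList none (some (u.length : Int)) := by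
      simp only [PySem.Chars.slice]
      rw [PySem.List.slice_to_neg_natCast _ _ htpos, PySem.List.slice_to_natCast]
      congr 1
      omega
    rw [PySem.Str.len_eq]
    show String.ofList (PySem.Chars.slice s.toList none (some (-(t.toList.length : Int)))) = String.ofList (PySem.Chars.slice s.toList none (some (u.length : Int)))
    rw [h1]
  · push Not at hex
    rw [pv_loop_nomatch s _ hex]
    rw [if_neg]
    rintro ⟨h1, h2⟩
    -- h2 : slice ∈ COMMON_TLDS; that slice is a suffix of s
    set r := PySem.Str.rfind s "." with hrdef
    have hsuf : (PySem.Str.slice s (some r) none).toList <:+ s.toList := by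
      rw [PySem.Str.toList_slice]
      simp only [PySem.Chars.slice]
      rw [PySem.List.slice_some_none]
      exact List.drop_suffix _ _
    exact hex _ h2 hsuf


-- ===== VERDICT (by name: the statement is the Claim_ definition above) =====
theorem normalize_mirror_name_spec : Claim_equal_normalize_mirror_name := by
  intro name _
  unfold Spec_normalize_mirror_name normalize_mirror_name normalize_mirror_name_alt
  by_cases h : name.toList = []
  · simp [h]
  · simp only [h, if_false]
    exact pv_core (PySem.Str.strip (PySem.Str.lower name))
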